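-- pv_equiv track=rewrite | github.com/Piracola/Elenchus | backend/app/agents/reference_preprocessor.py | _coalesce_summary
-- ===== SOURCE A (Python) =====
-- _SUMMARY_MAX_CHARS = 280
--
-- def _truncate(text: str, limit: int) -> str:
--     normalized = text.strip()
--     if len(normalized) <= limit:
--         return normalized
--     return normalized[:limit].rstrip() + "..."
--
-- def _coalesce_summary(paragraphs: list[str]) -> str:
--     summary_parts: list[str] = []
--     for paragraph in paragraphs:
--         if not paragraph:
--             continue
--         summary_parts.append(paragraph)
--         joined = " ".join(summary_parts)
--         if len(joined) >= _SUMMARY_MAX_CHARS: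
--             break
--         if len(summary_parts) >= 2:
--             break
--     return _truncate(" ".join(summary_parts), _SUMMARY_MAX_CHARS)
-- ===== SOURCE B (Python) =====
-- _SUMMARY_MAX_CHARS = 280
--
--
-- def _truncate(text: str, limit: int) -> str:
--     normalized = text.strip()
--     if len(normalized) <= limit:
--         return normalized
--     return normalized[:limit].rstrip() + "..."
--
--
-- def _coalesce_summary(paragraphs: list[str]) -> str:
--     nonempty = [p for p in paragraphs if p]
--     if nonempty and len(nonempty[0]) >= _SUMMARY_MAX_CHARS:
--         parts = nonempty[:1]
--     else:
--         parts = nonempty[:2]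
--     return _truncate(" ".join(parts), _SUMMARY_MAX_CHARS)
-- ===== Notes on version B (the rewrite author's own statement) =====
-- stated objective: simpler
-- what changed: Replaces A's accumulate-join-and-break loop (which re-joins the growing parts list each iteration) with a single filter of the nonempty paragraphs followed by a conditional slice (one paragraph if the first nonempty one already reaches 280 chars, else two), then the same truncation.
import Mathlib
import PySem

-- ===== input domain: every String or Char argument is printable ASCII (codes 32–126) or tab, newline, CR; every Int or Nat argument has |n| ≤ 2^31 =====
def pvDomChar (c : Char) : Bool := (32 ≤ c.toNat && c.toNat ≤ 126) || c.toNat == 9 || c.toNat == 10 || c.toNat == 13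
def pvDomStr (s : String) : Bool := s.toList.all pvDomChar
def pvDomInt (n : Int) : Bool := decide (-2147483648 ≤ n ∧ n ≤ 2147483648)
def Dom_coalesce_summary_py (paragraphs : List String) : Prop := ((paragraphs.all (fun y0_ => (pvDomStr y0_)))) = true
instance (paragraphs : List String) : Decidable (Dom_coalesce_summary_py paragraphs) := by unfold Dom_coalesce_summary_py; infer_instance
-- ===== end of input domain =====

-- B replaces A's accumulate-join-and-break loop with a filter of the nonempty
-- paragraphs plus a conditional slice; objective: simpler.

-- ===== PORT A =====
-- _truncate, shared verbatim by both Python versions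
def truncate_py (text : String) (limit : Int) : String :=
  let normalized := PySem.Str.strip text
  if (PySem.Str.len normalized : Int) ≤ limit then normalized
  else PySem.Str.rstrip (PySem.Str.slice normalized none (some limit)) ++ "..."

-- the 'for paragraph in paragraphs' loop of A, state = summary_parts
def coalesceLoopA : List String → List String → List String
  | [], parts => parts
  | p :: rest, parts =>
    if p = "" then coalesceLoopA rest parts
    else
      let parts' := parts ++ [p]
      let joined := PySem.Str.join " " parts'
      if (280 : Int) ≤ PySem.Str.len joined then parts'
      else if 2 ≤ parts'.length then parts'
      else coalesceLoopA rest parts'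

def coalesce_summary_py (paragraphs : List String) : String :=
  truncate_py (PySem.Str.join " " (coalesceLoopA paragraphs [])) 280

-- ===== PORT B =====
def coalesce_summary_py_alt (paragraphs : List String) : String :=
  let nonempty := paragraphs.filter (fun p => p ≠ "")
  let parts :=
    match nonempty with
    | [] => List.take 2 nonempty
    | f :: _ =>
      if (280 : Int) ≤ PySem.Str.len f then List.take 1 nonempty
      else List.take 2 nonempty
  truncate_py (PySem.Str.join " " parts) 280

-- ===== PRECONDITION & SPEC =====
def Spec_coalesce_summary_py (paragraphs : List String) (out : String) : Prop := out = coalesce_summary_py_alt paragraphs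
instance (paragraphs : List String) (out : String) : Decidable (Spec_coalesce_summary_py paragraphs out) := by unfold Spec_coalesce_summary_py; infer_instance

-- ===== CLAIM (what is proved, stated in full; the proofs are below) =====
def Claim_equal_coalesce_summary_py : Prop := ∀ (paragraphs : List String), Dom_coalesce_summary_py paragraphs → Spec_coalesce_summary_py paragraphs (coalesce_summary_py paragraphs)

-- ===== LEMMAS AND PROOFS =====

-- once one short paragraph p is collected, the loop just picks up one more nonempty paragraph
lemma coalesceLoopA_one (rest : List String) (p : String) :
    coalesceLoopA rest [p] = p :: (rest.filter (fun q => q ≠ "")).take 1 := by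
  induction rest with
  | nil => simp [coalesceLoopA]
  | cons q rest ih =>
    by_cases hq : q = ""
    · simp [coalesceLoopA, hq, ih]
    · simp only [coalesceLoopA, hq, List.filter_cons]
      by_cases hj : (280 : Int) ≤ PySem.Str.len (PySem.Str.join " " ([p] ++ [q]))
      · simp only [hj, if_true, List.take]
        simp [hq]
      · simp only [hj, if_false, List.length_append]
        simp [hq]

lemma coalesceLoopA_eq (ps : List String) :
    coalesceLoopA ps [] =
      match ps.filter (fun p => p ≠ "") with
      | [] => []
      | f :: t =>
        if (280 : Int) ≤ PySem.Str.len (PySem.Str.join " " [f]) then [f]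
        else f :: t.take 1 := by
  induction ps with
  | nil => simp [coalesceLoopA]
  | cons p rest ih =>
    by_cases hp : p = ""
    · simpa [coalesceLoopA, hp] using ih
    · simp only [coalesceLoopA, hp, List.nil_append, List.filter_cons]
      by_cases hj : (280 : Int) ≤ PySem.Str.len (PySem.Str.join " " [p])
      · have hj' : (280 : Int) ≤ (p.length : Int) := by simpa using hj
        simp [hj', hp]
      · have hj' : ¬ (280 : Int) ≤ (p.length : Int) := by simpa using hj
        simp [hj', hp, coalesceLoopA_one rest p]

-- a one-element join is the element itself
lemma join_singleton_len (f : String) : PySem.Str.join " " [f] = f := by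
  apply String.toList_injective
  simp [PySem.Chars.join_singleton]

-- ===== VERDICT (by name: the statement is the Claim_ definition above) =====
theorem coalesce_summary_py_spec : Claim_equal_coalesce_summary_py := by
  intro paragraphs _
  unfold Spec_coalesce_summary_py coalesce_summary_py coalesce_summary_py_alt
  rw [coalesceLoopA_eq]
  cases h : paragraphs.filter (fun p => p ≠ "") with
  | nil => simp
  | cons f t =>
    by_cases hf : (280 : Int) ≤ PySem.Str.len f
    · simp [join_singleton_len]
    · simp [join_singleton_len]
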